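-- pv_equiv track=rewrite | github.com/pypi-data/pypi-mirror-402 | packages/open-coscientist/open_coscientist-0.1.1.tar.gz/open_coscientist-0.1.1/src/open_coscientist/prompts.py | condense_literature_summary
-- ===== SOURCE A (Python) =====
-- def condense_literature_summary(articles_with_reasoning: str | None) -> str:
--     """
--     Condense full literature review summary to concise overview
--
--     Agent will read papers directly with tools, so keep brief (~15-20 lines)
--     Extracts 2-3 key sentences covering main themes and gaps
--     """
--     if not articles_with_reasoning:
--         return "No pre-curated literature review available."
--
--     # simple strategy: take first ~500 chars (usually covers main findings)
--     # plus extract any "gap" or "limitation" mentions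
--     text = articles_with_reasoning.strip()
--
--     # find main content sections (skip headers)
--     lines = [line for line in text.split("\n") if line.strip() and not line.startswith("#")]
--
--     # take first 2-3 substantive lines for themes
--     theme_lines = []
--     for line in lines[:10]:  # look in first 10 lines
--         if len(line) > 50:  # substantive line
--             theme_lines.append(line.strip())
--             if len(theme_lines) >= 2:
--                 break
--
--     # look for gap/limitation mentions
--     gap_lines = []
--     for line in lines:
--         line_lower = line.lower()
--         if any(kw in line_lower for kw in ["gap", "limitation", "unsolved", "need for", "lack of"]):
--             if len(line) > 50:  # substantive
--                 gap_lines.append(line.strip())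
--                 if len(gap_lines) >= 2:
--                     break
--
--     parts = []
--     if theme_lines:
--         # take first 300 chars of themes
--         themes_text = " ".join(theme_lines)[:300]
--         parts.append(f"**Key Themes:** {themes_text}...")
--
--     if gap_lines:
--         # take first 250 chars of gaps
--         gaps_text = " ".join(gap_lines)[:250]
--         parts.append(f"**Identified Gaps:** {gaps_text}...")
--
--     # fallback: just take first 400 chars
--     if not parts:
--         return (
--             text[:400] + "...\n\n(See papers below for details. Use tools to read papers directly.)"
--         )
--
--     result = "\n\n".join(parts)
--     result += (
--         "\n\n(Brief summary - use tools to examine papers directly for comprehensive details.)"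
--     )
--     return result
-- ===== SOURCE B (Python) =====
-- def condense_literature_summary(articles_with_reasoning):
--     """Single indexed pass collects themes and gaps together; sections assembled via an optional-valued helper."""
--     if not articles_with_reasoning:
--         return "No pre-curated literature review available."
--     text = articles_with_reasoning.strip()
--     lines = [l for l in text.split("\n") if l.strip() and not l.startswith("#")]
--     themes, gaps = [], []
--     for i, line in enumerate(lines):
--         if len(line) > 50:
--             if i < 10 and len(themes) < 2:
--                 themes.append(line.strip())
--             if len(gaps) < 2 and any(kw in line.lower() for kw in ("gap", "limitation", "unsolved", "need for", "lack of")):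
--                 gaps.append(line.strip())
--     def section(label, picked, cap):
--         return ("**" + label + ":** " + " ".join(picked)[:cap] + "...") if picked else None
--     sections = [s for s in (section("Key Themes", themes, 300), section("Identified Gaps", gaps, 250)) if s is not None]
--     if not sections:
--         return text[:400] + "...\n\n(See papers below for details. Use tools to read papers directly.)"
--     return "\n\n".join(sections) + "\n\n(Brief summary - use tools to examine papers directly for comprehensive details.)"
-- ===== Notes on version B (the rewrite author's own statement) =====
-- stated objective: simpler
-- what changed: A's two separate scans (themes over the first 10 filtered lines, gaps over all lines, each with its own early break) are fused into one indexed pass that collects both lists at once, and the two sections are assembled through a small optional-valued helper instead of two inline if-append blocks.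
import Mathlib
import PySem

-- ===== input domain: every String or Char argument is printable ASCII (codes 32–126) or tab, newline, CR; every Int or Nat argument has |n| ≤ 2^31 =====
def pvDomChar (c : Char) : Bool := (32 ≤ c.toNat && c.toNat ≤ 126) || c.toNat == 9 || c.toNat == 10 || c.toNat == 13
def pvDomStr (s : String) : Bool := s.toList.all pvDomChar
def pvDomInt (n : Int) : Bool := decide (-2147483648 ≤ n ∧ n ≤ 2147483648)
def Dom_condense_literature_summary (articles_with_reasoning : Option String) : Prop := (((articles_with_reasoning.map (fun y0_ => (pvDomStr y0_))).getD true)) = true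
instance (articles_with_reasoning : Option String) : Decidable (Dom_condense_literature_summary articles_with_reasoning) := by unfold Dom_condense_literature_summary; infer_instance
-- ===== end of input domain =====

-- B fuses A's two scans (first-10-lines theme scan and whole-text gap scan, each with an
-- early break) into ONE indexed pass collecting both lists, and assembles the sections via
-- an optional-valued helper; objective: simpler (one traversal), not claimed faster.

-- ===== PORT A =====
def pvAKws : List String := ["gap", "limitation", "unsolved", "need for", "lack of"]

-- A's first loop: over lines[:10], append stripped line when len > 50, break at 2
def pvAThemeLoop : List String → List String → List String
  | [], acc => acc
  | l :: ls, acc =>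
    if PySem.Str.len l > 50 then
      let acc' := acc ++ [PySem.Str.strip l]
      if acc'.length ≥ 2 then acc' else pvAThemeLoop ls acc'
    else pvAThemeLoop ls acc

-- A's second loop: over all lines, keyword test on the lowered line, then len > 50, break at 2
def pvAGapLoop : List String → List String → List String
  | [], acc => acc
  | l :: ls, acc =>
    if pvAKws.any (fun kw => PySem.Str.isIn kw (PySem.Str.lower l)) then
      if PySem.Str.len l > 50 then
        let acc' := acc ++ [PySem.Str.strip l]
        if acc'.length ≥ 2 then acc' else pvAGapLoop ls acc'
      else pvAGapLoop ls acc
    else pvAGapLoop ls acc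

def condense_literature_summary (articles_with_reasoning : Option String) : String :=
  match articles_with_reasoning with
  | none => "No pre-curated literature review available."
  | some s =>
    if s.toList.isEmpty then "No pre-curated literature review available."
    else
      let text := PySem.Str.strip s
      let lines := ((PySem.Str.split? text "\n").getD []).filter
        (fun l => !(PySem.Str.strip l).toList.isEmpty && !PySem.Str.startswith l "#")
      let theme_lines := pvAThemeLoop (lines.take 10) []
      let gap_lines := pvAGapLoop lines []
      let parts : List String :=
        (if theme_lines.isEmpty then [] else
          [PySem.Str.join "" ["**Key Themes:** ",
            PySem.Str.slice (PySem.Str.join " " theme_lines) none (some 300), "..."]]) ++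
        (if gap_lines.isEmpty then [] else
          [PySem.Str.join "" ["**Identified Gaps:** ",
            PySem.Str.slice (PySem.Str.join " " gap_lines) none (some 250), "..."]])
      if parts.isEmpty then
        PySem.Str.join "" [PySem.Str.slice text none (some 400),
          "...\n\n(See papers below for details. Use tools to read papers directly.)"]
      else
        PySem.Str.join "" [PySem.Str.join "\n\n" parts,
          "\n\n(Brief summary - use tools to examine papers directly for comprehensive details.)"]

-- ===== PORT B =====
def pvBKws : List String := ["gap", "limitation", "unsolved", "need for", "lack of"]

-- one indexed pass: themes only while i < 10 and fewer than 2 collected; gaps over all lines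
def pvBFused : List String → Nat → List String → List String → List String × List String
  | [], _, th, gp => (th, gp)
  | l :: ls, i, th, gp =>
    if PySem.Str.len l > 50 then
      let th' := if i < 10 ∧ th.length < 2 then th ++ [PySem.Str.strip l] else th
      let gp' := if gp.length < 2 ∧ pvBKws.any (fun kw => PySem.Str.isIn kw (PySem.Str.lower l))
                 then gp ++ [PySem.Str.strip l] else gp
      pvBFused ls (i + 1) th' gp'
    else pvBFused ls (i + 1) th gp

-- section(label, picked, cap): None when picked is empty, else the formatted section
def pvBSection (label : String) (picked : List String) (cap : Int) : Option String :=
  if picked.isEmpty then none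
  else some (PySem.Str.join "" ["**", label, ":** ",
    PySem.Str.slice (PySem.Str.join " " picked) none (some cap), "..."])

def condense_literature_summary_alt (articles_with_reasoning : Option String) : String :=
  match articles_with_reasoning with
  | none => "No pre-curated literature review available."
  | some s =>
    if s.toList.isEmpty then "No pre-curated literature review available."
    else
      let text := PySem.Str.strip s
      let lines := ((PySem.Str.split? text "\n").getD []).filter
        (fun l => !(PySem.Str.strip l).toList.isEmpty && !PySem.Str.startswith l "#")
      let tg := pvBFused lines 0 [] []
      let sections := [pvBSection "Key Themes" tg.1 300,
                       pvBSection "Identified Gaps" tg.2 250].filterMap id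
      if sections.isEmpty then
        PySem.Str.join "" [PySem.Str.slice text none (some 400),
          "...\n\n(See papers below for details. Use tools to read papers directly.)"]
      else
        PySem.Str.join "" [PySem.Str.join "\n\n" sections,
          "\n\n(Brief summary - use tools to examine papers directly for comprehensive details.)"]

-- ===== PRECONDITION & SPEC =====
def Spec_condense_literature_summary (articles_with_reasoning : Option String) (out : String) : Prop := out = condense_literature_summary_alt articles_with_reasoning
instance (articles_with_reasoning : Option String) (out : String) : Decidable (Spec_condense_literature_summary articles_with_reasoning out) := by unfold Spec_condense_literature_summary; infer_instance

-- ===== CLAIM (what is proved, stated in full; the proofs are below) =====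
def Claim_equal_condense_literature_summary : Prop := ∀ (articles_with_reasoning : Option String), Dom_condense_literature_summary articles_with_reasoning → Spec_condense_literature_summary articles_with_reasoning (condense_literature_summary articles_with_reasoning)

-- ===== LEMMAS AND PROOFS =====

-- break-free form of A's theme loop: a fold whose guard carries the cap
def pvCapT : List String → List String → List String
  | [], th => th
  | l :: ls, th =>
    pvCapT ls (if th.length < 2 ∧ PySem.Str.len l > 50 then th ++ [PySem.Str.strip l] else th)

def pvCapG : List String → List String → List String
  | [], gp => gp
  | l :: ls, gp =>
    pvCapG ls (if gp.length < 2 ∧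
        pvAKws.any (fun kw => PySem.Str.isIn kw (PySem.Str.lower l)) ∧ PySem.Str.len l > 50
      then gp ++ [PySem.Str.strip l] else gp)

lemma pvCapT_full (ls : List String) (th : List String) (h : 2 ≤ th.length) :
    pvCapT ls th = th := by
  induction ls with
  | nil => rfl
  | cons l ls ih =>
    simp only [pvCapT]
    rw [if_neg (by omega)]
    exact ih

lemma pvCapG_full (ls : List String) (gp : List String) (h : 2 ≤ gp.length) :
    pvCapG ls gp = gp := by
  induction ls with
  | nil => rfl
  | cons l ls ih =>
    simp only [pvCapG]
    rw [if_neg (by push_neg; intro h2; omega)]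
    exact ih

lemma pvAThemeLoop_eq_capT (ls : List String) : ∀ th : List String, th.length < 2 →
    pvAThemeLoop ls th = pvCapT ls th := by
  induction ls with
  | nil => intro th _; rfl
  | cons l ls ih =>
    intro th hth
    simp only [pvAThemeLoop, pvCapT]
    by_cases hlen : PySem.Str.len l > 50
    · rw [if_pos hlen, if_pos (show th.length < 2 ∧ PySem.Str.len l > 50 from ⟨hth, hlen⟩)]
      by_cases hfull : (th ++ [PySem.Str.strip l]).length ≥ 2
      · rw [if_pos hfull, pvCapT_full _ _ hfull]
      · rw [if_neg hfull]
        exact ih _ (by omega)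
    · rw [if_neg hlen, if_neg (by tauto)]
      exact ih _ hth

lemma pvAGapLoop_eq_capG (ls : List String) : ∀ gp : List String, gp.length < 2 →
    pvAGapLoop ls gp = pvCapG ls gp := by
  induction ls with
  | nil => intro gp _; rfl
  | cons l ls ih =>
    intro gp hgp
    simp only [pvAGapLoop, pvCapG]
    by_cases hkw : pvAKws.any (fun kw => PySem.Str.isIn kw (PySem.Str.lower l)) = true
    · rw [if_pos hkw]
      by_cases hlen : PySem.Str.len l > 50
      · rw [if_pos hlen, if_pos (show gp.length < 2 ∧ (pvAKws.any fun kw => PySem.Str.isIn kw (PySem.Str.lower l)) = true ∧ PySem.Str.len l > 50 from ⟨hgp, hkw, hlen⟩)]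
        by_cases hfull : (gp ++ [PySem.Str.strip l]).length ≥ 2
        · rw [if_pos hfull, pvCapG_full _ _ hfull]
        · rw [if_neg hfull]
          exact ih _ (by omega)
      · rw [if_neg hlen, if_neg (by tauto)]
        exact ih _ hgp
    · rw [if_neg hkw, if_neg (by tauto)]
      exact ih _ hgp

lemma pvBKws_eq : pvBKws = pvAKws := rfl

lemma pvBFused_eq (ls : List String) : ∀ (i : Nat) (th gp : List String),
    pvBFused ls i th gp = (pvCapT (ls.take (10 - i)) th, pvCapG ls gp) := by
  induction ls with
  | nil => intro i th gp; simp [pvBFused, pvCapT, pvCapG]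
  | cons l ls ih =>
    intro i th gp
    simp only [pvBFused, pvBKws_eq]
    by_cases hi : i < 10
    · have htake : (l :: ls).take (10 - i) = l :: ls.take (10 - (i + 1)) := by
        have : 10 - i = (10 - (i + 1)) + 1 := by omega
        rw [this, List.take_succ_cons]
      rw [htake]
      simp only [pvCapT, pvCapG]
      by_cases hlen : PySem.Str.len l > 50
      · rw [if_pos hlen, ih]
        congr 1
        · congr 1
          by_cases hth : th.length < 2
          · rw [if_pos ⟨hi, hth⟩, if_pos ⟨hth, hlen⟩]
          · rw [if_neg (by tauto), if_neg (by tauto)]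
        · congr 1
          by_cases hgp : gp.length < 2 ∧
              pvAKws.any (fun kw => PySem.Str.isIn kw (PySem.Str.lower l)) = true
          · rw [if_pos hgp, if_pos ⟨hgp.1, hgp.2, hlen⟩]
          · rw [if_neg hgp, if_neg (by tauto)]
      · rw [if_neg hlen, ih]
        congr 2 <;> exact (if_neg (by tauto)).symm
    · have htake0 : (l :: ls).take (10 - i) = [] := by
        have : 10 - i = 0 := by omega
        simp [this]
      have htake0' : ls.take (10 - (i + 1)) = [] := by
        have : 10 - (i + 1) = 0 := by omega
        simp [this]
      rw [htake0]
      simp only [pvCapT, pvCapG]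
      by_cases hlen : PySem.Str.len l > 50
      · rw [if_pos hlen, ih, htake0']
        simp only [pvCapT]
        congr 1
        · rw [if_neg (by tauto)]
        · congr 1
          by_cases hgp : gp.length < 2 ∧
              pvAKws.any (fun kw => PySem.Str.isIn kw (PySem.Str.lower l)) = true
          · rw [if_pos hgp, if_pos ⟨hgp.1, hgp.2, hlen⟩]
          · rw [if_neg hgp, if_neg (by tauto)]
      · rw [if_neg hlen, ih, htake0']
        simp only [pvCapT]
        congr 2 <;> exact (if_neg (by tauto)).symm

-- A's parts list equals B's filterMap-of-sections list
lemma pvParts_eq (th gp : List String) :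
    (if th.isEmpty then [] else
      [PySem.Str.join "" ["**Key Themes:** ",
        PySem.Str.slice (PySem.Str.join " " th) none (some 300), "..."]]) ++
    (if gp.isEmpty then [] else
      [PySem.Str.join "" ["**Identified Gaps:** ",
        PySem.Str.slice (PySem.Str.join " " gp) none (some 250), "..."]]) =
    [pvBSection "Key Themes" th 300, pvBSection "Identified Gaps" gp 250].filterMap id := by
  have hlbl1 : PySem.Str.join "" ["**Key Themes:** ",
        PySem.Str.slice (PySem.Str.join " " th) none (some 300), "..."] =
      PySem.Str.join "" ["**", "Key Themes", ":** ",
        PySem.Str.slice (PySem.Str.join " " th) none (some 300), "..."] := by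
    simp [PySem.Str.join, PySem.Chars.join, List.intercalate, List.intersperse]
  have hlbl2 : PySem.Str.join "" ["**Identified Gaps:** ",
        PySem.Str.slice (PySem.Str.join " " gp) none (some 250), "..."] =
      PySem.Str.join "" ["**", "Identified Gaps", ":** ",
        PySem.Str.slice (PySem.Str.join " " gp) none (some 250), "..."] := by
    simp [PySem.Str.join, PySem.Chars.join, List.intercalate, List.intersperse]
  simp only [pvBSection]
  by_cases hth : th.isEmpty <;> by_cases hgp : gp.isEmpty <;>
    simp [hth, hgp, hlbl1, hlbl2, List.filterMap]

-- ===== VERDICT (by name: the statement is the Claim_ definition above) =====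
set_option maxHeartbeats 1000000 in
theorem condense_literature_summary_spec : Claim_equal_condense_literature_summary := by
  intro o _
  unfold Spec_condense_literature_summary
  match o with
  | none => rfl
  | some s =>
    by_cases hs : s.toList.isEmpty
    · simp only [condense_literature_summary, condense_literature_summary_alt, if_pos hs]
    · simp only [condense_literature_summary, condense_literature_summary_alt, if_neg hs,
        pvBFused_eq, Nat.sub_zero]
      rw [pvAThemeLoop_eq_capT _ _ (by simp), pvAGapLoop_eq_capG _ _ (by simp), pvParts_eq]
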